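-- pv_equiv track=rewrite | github.com/magnusouren/master-debugger | backend/training/train_xgboost_trigger_classifier.py | _build_outside_bounds_labels
-- ===== SOURCE A (Python) =====
-- from typing import Any, Dict, List, Optional, Tuple
--
-- def _build_outside_bounds_labels(outside_flags: List[bool], consecutive_n: int) -> List[int]:
--     """
--     Convert outside-bounds booleans into consecutive-window trigger labels.
--
--     Example for consecutive_n=2:
--     outside = [F, T, T, T, F, T, T]
--     labels  = [0, 0, 1, 1, 0, 0, 1]
--     """
--     labels: List[int] = []
--     run_len = 0
--
--     for outside in outside_flags:
--         if outside:
--             run_len += 1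
--         else:
--             run_len = 0
--
--         labels.append(1 if run_len >= consecutive_n else 0)
--
--     return labels
-- ===== SOURCE B (Python) =====
-- from itertools import groupby
-- from typing import List
--
--
-- def _build_outside_bounds_labels(outside_flags: List[bool], consecutive_n: int) -> List[int]:
--     # Phase 1: for each position, the length of the consecutive True-run ending there.
--     run_lens: List[int] = []
--     for value, grp in groupby(outside_flags):
--         length = sum(1 for _ in grp)
--         run_lens.extend(range(1, length + 1) if value else [0] * length)
--     # Phase 2: threshold every run length uniformly.
--     return [int(r >= consecutive_n) for r in run_lens]
-- ===== Notes on version B (the rewrite author's own statement) =====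
-- stated objective: alternative
-- what changed: Replaces the single loop carrying a run_len counter with a two-phase pipeline: itertools.groupby computes per-position run lengths of maximal runs in bulk, then one uniform comparison maps run lengths to labels.
import Mathlib
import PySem

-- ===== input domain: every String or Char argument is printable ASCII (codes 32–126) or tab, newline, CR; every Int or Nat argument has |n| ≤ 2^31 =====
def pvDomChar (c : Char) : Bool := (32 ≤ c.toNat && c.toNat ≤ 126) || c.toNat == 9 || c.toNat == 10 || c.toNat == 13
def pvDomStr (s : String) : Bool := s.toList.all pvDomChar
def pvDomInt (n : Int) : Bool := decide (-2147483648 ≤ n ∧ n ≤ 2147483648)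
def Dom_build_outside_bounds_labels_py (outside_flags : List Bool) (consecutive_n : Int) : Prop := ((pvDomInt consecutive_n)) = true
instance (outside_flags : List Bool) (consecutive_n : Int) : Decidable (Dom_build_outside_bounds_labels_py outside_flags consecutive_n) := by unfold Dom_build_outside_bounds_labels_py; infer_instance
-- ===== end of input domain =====

-- B is a two-phase pipeline (groupby run lengths, then one uniform threshold map) instead of A's single loop with a run_len counter; same cost, different decomposition.

-- ===== PORT A =====
-- the for-loop as a fold over the state (labels, run_len), appending one label per element
def pvAStep (consecutive_n : Int) (st : List Int × Int) (outside : Bool) : List Int × Int :=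
  let run_len := if outside then st.2 + 1 else 0
  (st.1 ++ [if run_len ≥ consecutive_n then (1 : Int) else 0], run_len)

def build_outside_bounds_labels_py (outside_flags : List Bool) (consecutive_n : Int) : List Int :=
  (outside_flags.foldl (pvAStep consecutive_n) ([], 0)).1

-- ===== PORT B =====
-- phase 1 (groupby loop): peel one maximal run at a time, emit its run lengths in bulk
def pvRunLens (outside_flags : List Bool) : List Int :=
  match outside_flags with
  | [] => []
  | b :: t =>
    let length : Nat := (t.takeWhile (· == b)).length + 1
    (if b then PySem.List.pyRange 1 ((length : Int) + 1) 1
     else List.replicate length (0 : Int))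
      ++ pvRunLens (t.dropWhile (· == b))
termination_by outside_flags.length
decreasing_by
  simpa using Nat.lt_succ_of_le (List.length_dropWhile_le (· == b) t)

-- phase 2: the uniform threshold comprehension
def build_outside_bounds_labels_py_alt (outside_flags : List Bool) (consecutive_n : Int) : List Int :=
  (pvRunLens outside_flags).map (fun r => if r ≥ consecutive_n then (1 : Int) else 0)

-- ===== PRECONDITION & SPEC =====
def Spec_build_outside_bounds_labels_py (outside_flags : List Bool) (consecutive_n : Int) (out : List Int) : Prop := out = build_outside_bounds_labels_py_alt outside_flags consecutive_n
instance (outside_flags : List Bool) (consecutive_n : Int) (out : List Int) : Decidable (Spec_build_outside_bounds_labels_py outside_flags consecutive_n out) := by unfold Spec_build_outside_bounds_labels_py; infer_instance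

-- ===== CLAIM (what is proved, stated in full; the proofs are below) =====
def Claim_equal_build_outside_bounds_labels_py : Prop := ∀ (outside_flags : List Bool) (consecutive_n : Int), Dom_build_outside_bounds_labels_py outside_flags consecutive_n → Spec_build_outside_bounds_labels_py outside_flags consecutive_n (build_outside_bounds_labels_py outside_flags consecutive_n)

-- ===== LEMMAS AND PROOFS =====

-- cons-style characterization of A's fold
def pvGo (n : Int) (r : Int) : List Bool → List Int
  | [] => []
  | f :: t =>
    let r' := if f then r + 1 else 0
    (if r' ≥ n then (1 : Int) else 0) :: pvGo n r' t

theorem pvGo_false (n r : Int) (t : List Bool) :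
    pvGo n r (false :: t) = (if (0 : Int) ≥ n then 1 else 0) :: pvGo n 0 t := by
  simp [pvGo]

theorem pvGo_true (n r : Int) (t : List Bool) :
    pvGo n r (true :: t) = (if r + 1 ≥ n then (1 : Int) else 0) :: pvGo n (r + 1) t := by
  simp [pvGo]

theorem pvFoldl_eq (n : Int) : ∀ (fl : List Bool) (acc : List Int) (r : Int),
    (fl.foldl (pvAStep n) (acc, r)).1 = acc ++ pvGo n r fl := by
  intro fl
  induction fl with
  | nil => simp [pvGo]
  | cons f t ih =>
      intro acc r
      simp only [List.foldl_cons, pvAStep, pvGo]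
      rw [ih]
      simp

-- a False run: every position gets the label for run_len = 0, regardless of incoming r
theorem pvFalseRun (n : Int) : ∀ (t : List Bool) (r : Int),
    pvGo n r (false :: t) =
      List.replicate ((t.takeWhile (· == false)).length + 1)
        (if (0 : Int) ≥ n then 1 else 0)
      ++ pvGo n 0 (t.dropWhile (· == false)) := by
  intro t
  induction t with
  | nil => intro r; simp [pvGo]
  | cons x t' ih =>
      intro r
      cases x with
      | false =>
          rw [pvGo_false, ih 0]
          simp [List.replicate_succ]
      | true =>
          rw [pvGo_false]
          simp [List.replicate_succ]

-- a True run starting from counter r: labels are r+1, r+2, … compared with n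
theorem pvTrueRun (n : Int) : ∀ (t : List Bool) (r : Int),
    pvGo n r (true :: t) =
      (PySem.List.pyRange (r + 1) (r + ((t.takeWhile (· == true)).length + 1) + 1) 1).map
        (fun j => if j ≥ n then (1 : Int) else 0)
      ++ pvGo n (r + ((t.takeWhile (· == true)).length + 1)) (t.dropWhile (· == true)) := by
  intro t
  induction t with
  | nil =>
      intro r
      simp [pvGo, PySem.List.pyRange_one_singleton]
  | cons x t' ih =>
      intro r
      cases x with
      | true =>
          rw [pvGo_true, ih (r + 1)]
          simp only [List.takeWhile_cons, List.dropWhile_cons, beq_self_eq_true, if_true,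
            List.length_cons, Nat.cast_add, Nat.cast_one]
          have hlt : r + 1 < r + (((t'.takeWhile (· == true)).length : Int) + 1 + 1) + 1 := by omega
          rw [PySem.List.pyRange_one_cons hlt, List.map_cons, List.cons_append]
          have eB : r + 1 + (((t'.takeWhile (· == true)).length : Int) + 1) + 1
              = r + (((t'.takeWhile (· == true)).length : Int) + 1 + 1) + 1 := by ring
          have eS : r + 1 + (((t'.takeWhile (· == true)).length : Int) + 1)
              = r + (((t'.takeWhile (· == true)).length : Int) + 1 + 1) := by ring
          rw [eB, eS]
      | false =>
          rw [pvGo_true]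
          simp [PySem.List.pyRange_one_singleton]

-- after a True run the next element (if any) is False, so the incoming counter is irrelevant
theorem pvGo_reset (n : Int) (r : Int) : ∀ (s : List Bool),
    (∀ x ∈ s.head?, x = false) → pvGo n r s = pvGo n 0 s := by
  intro s hs
  cases s with
  | nil => rfl
  | cons x t =>
      have hx : x = false := hs x rfl
      subst hx
      simp [pvGo]

theorem pvMainAux (n : Int) : ∀ (N : Nat) (fl : List Bool), fl.length ≤ N →
    pvGo n 0 fl = (pvRunLens fl).map (fun r => if r ≥ n then (1 : Int) else 0) := by
  intro N
  induction N with
  | zero =>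
      intro fl hfl
      have : fl = [] := List.eq_nil_of_length_eq_zero (Nat.le_zero.mp hfl)
      subst this
      simp [pvGo, pvRunLens]
  | succ N ih =>
      intro fl hfl
      match fl with
      | [] => simp [pvGo, pvRunLens]
      | b :: t =>
        have hlen : (t.dropWhile (· == b)).length ≤ N := by
          have := List.length_dropWhile_le (· == b) t
          simp at hfl
          omega
        have ihrest := ih _ hlen
        rw [pvRunLens]
        cases b with
        | false =>
            simp only [if_neg (by simp : ¬ false = true)]
            rw [pvFalseRun n t 0, ihrest]
            simp [List.map_replicate]
        | true =>
            simp only [if_pos]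
            rw [pvTrueRun n t 0]
            have hhead : ∀ x ∈ (t.dropWhile (· == true)).head?, x = false := by
              intro x hx
              have h2 := List.head?_dropWhile_not (· == true) t
              cases hd : List.dropWhile (· == true) t with
              | nil => rw [hd] at hx; simp at hx
              | cons y ys =>
                  rw [hd] at hx h2
                  simp only [List.head?_cons] at hx h2
                  simp at h2
                  cases hx
                  exact h2
            rw [pvGo_reset n _ _ hhead, ihrest]
            simp

theorem pvMain (n : Int) (fl : List Bool) :
    pvGo n 0 fl = build_outside_bounds_labels_py_alt fl n :=
  pvMainAux n fl.length fl le_rfl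

-- ===== VERDICT (by name: the statement is the Claim_ definition above) =====
theorem build_outside_bounds_labels_py_spec : Claim_equal_build_outside_bounds_labels_py := by
  intro fl n _
  show _ = _
  rw [build_outside_bounds_labels_py, pvFoldl_eq, List.nil_append, pvMain]
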